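-- pv_equiv track=rewrite | github.com/PadsterH2012/archon-plus | python/src/server/services/workflow/mcp_tool_integration.py | _find_parameter_alias
-- ===== SOURCE A (Python) =====
-- from typing import Any, Dict, List, Optional, Tuple, Union
--
-- def _find_parameter_alias(step_param: str, tool_params: Dict[str, Any]) -> Optional[str]:
--     """Find parameter alias for common parameter name variations"""
--     # Common parameter aliases
--     aliases = {
--         "id": ["task_id", "project_id", "doc_id"],
--         "name": ["title", "workflow_name"],
--         "text": ["query", "content", "description"],
--         "count": ["match_count", "limit", "per_page"],
--         "filter": ["source", "source_id", "filter_by"],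
--         "type": ["document_type", "action"]
--     }
--
--     # Check if step parameter matches any alias
--     for tool_param in tool_params.keys():
--         if step_param == tool_param:
--             return tool_param
--
--         # Check aliases
--         for alias_group in aliases.values():
--             if step_param in alias_group and tool_param in alias_group:
--                 return tool_param
--
--     return None
-- ===== SOURCE B (Python) =====
-- def _find_parameter_alias(step_param, tool_params):
--     """Find parameter alias for common parameter name variations"""
--     aliases = {
--         "id": ["task_id", "project_id", "doc_id"],
--         "name": ["title", "workflow_name"],
--         "text": ["query", "content", "description"],
--         "count": ["match_count", "limit", "per_page"],
--         "filter": ["source", "source_id", "filter_by"],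
--         "type": ["document_type", "action"]
--     }
--     # Precompute all names compatible with step_param: itself plus every
--     # member of every alias group that contains it.
--     candidates = {step_param}
--     for group in aliases.values():
--         if step_param in group:
--             candidates.update(group)
--     # Single pass over tool_params in order; first key in the candidate set wins.
--     for tool_param in tool_params.keys():
--         if tool_param in candidates:
--             return tool_param
--     return None
-- ===== Notes on version B (the rewrite author's own statement) =====
-- stated objective: faster
-- what changed: B hoists the inner alias-group scan out of the loop into a one-time candidate set ({step_param} plus all members of groups containing it), then does a single ordered pass over tool_params keys testing set membership; A's nested per-key group scan disappears.
import Mathlib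
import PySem

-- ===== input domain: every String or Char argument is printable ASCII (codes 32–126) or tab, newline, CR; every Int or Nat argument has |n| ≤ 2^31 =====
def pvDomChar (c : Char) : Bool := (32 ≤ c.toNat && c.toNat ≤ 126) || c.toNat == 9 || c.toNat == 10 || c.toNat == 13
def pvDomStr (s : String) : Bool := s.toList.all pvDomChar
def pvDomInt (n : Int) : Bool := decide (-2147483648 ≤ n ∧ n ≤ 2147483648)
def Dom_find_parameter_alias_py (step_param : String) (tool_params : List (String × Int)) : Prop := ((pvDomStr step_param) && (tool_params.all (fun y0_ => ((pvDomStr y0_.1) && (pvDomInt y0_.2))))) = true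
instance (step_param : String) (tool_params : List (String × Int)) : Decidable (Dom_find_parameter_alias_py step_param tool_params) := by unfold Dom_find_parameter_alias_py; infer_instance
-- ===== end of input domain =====

-- B builds the alias candidate set once and replaces A's nested per-key group scan with a single ordered membership pass (simpler).


-- ===== PORT A =====
def pvAliasGroups : List (List String) :=
  [["task_id", "project_id", "doc_id"],
   ["title", "workflow_name"],
   ["query", "content", "description"],
   ["match_count", "limit", "per_page"],
   ["source", "source_id", "filter_by"],
   ["document_type", "action"]]

-- inner loop of A: `for alias_group in aliases.values(): if step_param in alias_group and tool_param in alias_group: return tool_param`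
def pvInnerA (step_param tool_param : String) : List (List String) → Bool
  | [] => false
  | g :: gs =>
    if g.contains step_param && g.contains tool_param then true
    else pvInnerA step_param tool_param gs

-- outer loop of A over tool_params.keys()
def pvOuterA (step_param : String) : List (String × Int) → Option String
  | [] => none
  | (k, _) :: rest =>
    if step_param == k then some k
    else if pvInnerA step_param k pvAliasGroups then some k
    else pvOuterA step_param rest

def find_parameter_alias_py (step_param : String) (tool_params : List (String × Int)) : Option String :=
  pvOuterA step_param tool_params

-- ===== PORT B =====
-- B: build the candidate set once ({step_param} plus every group containing it), then one pass over the keys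
def pvCandidates (step_param : String) : PySem.Set String :=
  pvAliasGroups.foldl
    (fun acc g => if g.contains step_param then PySem.Set.update acc g else acc)
    (PySem.Set.ofList [step_param])

def pvScanB (cands : PySem.Set String) : List (String × Int) → Option String
  | [] => none
  | (k, _) :: rest => if PySem.Set.contains cands k then some k else pvScanB cands rest

def find_parameter_alias_py_alt (step_param : String) (tool_params : List (String × Int)) : Option String :=
  pvScanB (pvCandidates step_param) tool_params

-- ===== PRECONDITION & SPEC =====
def Spec_find_parameter_alias_py (step_param : String) (tool_params : List (String × Int)) (out : Option String) : Prop := out = find_parameter_alias_py_alt step_param tool_params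
instance (step_param : String) (tool_params : List (String × Int)) (out : Option String) : Decidable (Spec_find_parameter_alias_py step_param tool_params out) := by unfold Spec_find_parameter_alias_py; infer_instance

-- ===== CLAIM (what is proved, stated in full; the proofs are below) =====
def Claim_equal_find_parameter_alias_py : Prop := ∀ (step_param : String) (tool_params : List (String × Int)), Dom_find_parameter_alias_py step_param tool_params → Spec_find_parameter_alias_py step_param tool_params (find_parameter_alias_py step_param tool_params)

-- ===== LEMMAS AND PROOFS =====

lemma pvInnerA_iff (sp k : String) (gs : List (List String)) :
    pvInnerA sp k gs = true ↔ ∃ g ∈ gs, sp ∈ g ∧ k ∈ g := by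
  induction gs with
  | nil => simp [pvInnerA]
  | cons g gs ih =>
    by_cases h : (g.contains sp && g.contains k) = true
    · rw [pvInnerA, if_pos h]
      simp only [Bool.and_eq_true, List.contains_iff_mem] at h
      exact iff_of_true rfl ⟨g, by simp, h.1, h.2⟩
    · rw [pvInnerA, if_neg h, ih]
      simp only [Bool.and_eq_true, List.contains_iff_mem] at h
      constructor
      · rintro ⟨g', hg', hsp, hk⟩; exact ⟨g', by simp [hg'], hsp, hk⟩
      · rintro ⟨g', hg', hsp, hk⟩
        rcases List.mem_cons.mp hg' with rfl | hmem
        · exact absurd ⟨hsp, hk⟩ h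
        · exact ⟨g', hmem, hsp, hk⟩

lemma mem_foldl_update (sp k : String) (gs : List (List String)) (acc : PySem.Set String) :
    k ∈ gs.foldl (fun acc g => if g.contains sp then PySem.Set.update acc g else acc) acc ↔
      k ∈ acc ∨ ∃ g ∈ gs, sp ∈ g ∧ k ∈ g := by
  induction gs generalizing acc with
  | nil => simp
  | cons g gs ih =>
    by_cases h : g.contains sp = true
    · simp only [List.foldl_cons, h, if_pos, ih, PySem.Set.mem_update]
      rw [List.contains_iff_mem] at h
      constructor
      · rintro (⟨hk | hk⟩ | ⟨g', hg', hsp', hk'⟩)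
        · exact Or.inl hk
        · exact Or.inr ⟨g, by simp, h, hk⟩
        · exact Or.inr ⟨g', by simp [hg'], hsp', hk'⟩
      · rintro (hk | ⟨g', hg', hsp', hk'⟩)
        · exact Or.inl (Or.inl hk)
        · rcases List.mem_cons.mp hg' with rfl | hmem
          · exact Or.inl (Or.inr hk')
          · exact Or.inr ⟨g', hmem, hsp', hk'⟩
    · simp only [List.foldl_cons, h, if_neg, ih, Bool.false_eq_true, not_false_iff]
      rw [Bool.not_eq_true, ← Bool.not_eq_true, List.contains_iff_mem] at h
      constructor
      · rintro (hk | ⟨g', hg', hsp', hk'⟩)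
        · exact Or.inl hk
        · exact Or.inr ⟨g', by simp [hg'], hsp', hk'⟩
      · rintro (hk | ⟨g', hg', hsp', hk'⟩)
        · exact Or.inl hk
        · rcases List.mem_cons.mp hg' with rfl | hmem
          · exact absurd hsp' h
          · exact Or.inr ⟨g', hmem, hsp', hk'⟩

lemma contains_candidates (sp k : String) :
    PySem.Set.contains (pvCandidates sp) k = true ↔
      sp = k ∨ pvInnerA sp k pvAliasGroups = true := by
  rw [PySem.Set.contains_iff, pvCandidates, mem_foldl_update, pvInnerA_iff,
    PySem.Set.mem_ofList]
  simp [eq_comm]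

lemma outer_eq_scan (sp : String) (l : List (String × Int)) :
    pvOuterA sp l = pvScanB (pvCandidates sp) l := by
  induction l with
  | nil => rfl
  | cons kv rest ih =>
    obtain ⟨k, v⟩ := kv
    by_cases hk : sp = k
    · subst hk
      have hm : sp ∈ pvCandidates sp := by
        rw [← PySem.Set.contains_iff]
        exact (contains_candidates sp sp).mpr (Or.inl rfl)
      simp [pvOuterA, pvScanB, hm]
    · by_cases hin : pvInnerA sp k pvAliasGroups = true
      · have hm : k ∈ pvCandidates sp := by
          rw [← PySem.Set.contains_iff]
          exact (contains_candidates sp k).mpr (Or.inr hin)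
        simp [pvOuterA, pvScanB, hk, hin, hm]
      · have hm : k ∉ pvCandidates sp := by
          intro h
          rw [← PySem.Set.contains_iff] at h
          rcases (contains_candidates sp k).mp h with h' | h'
          · exact hk h'
          · exact hin h'
        simp [pvOuterA, pvScanB, hk, hin, hm, ih]

-- ===== VERDICT (by name: the statement is the Claim_ definition above) =====
theorem find_parameter_alias_py_spec : Claim_equal_find_parameter_alias_py := by
  intro sp tp _
  unfold Spec_find_parameter_alias_py find_parameter_alias_py find_parameter_alias_py_alt
  exact outer_eq_scan sp tp
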